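-- pv_equiv track=rewrite | github.com/MadeleineHarbom/Algorithmer | Obligatorisk_Opgave_2/g_2014_ND.py | find_longest_list
-- ===== SOURCE A (Python) =====
-- def find_longest_list(lissst, free_seats):
--     longest_list_index = None
--     if len(lissst) > 1:
--         for i in range(0, len(lissst)):
--             if len(lissst[i]) <= free_seats:
--                 if longest_list_index is None or len(lissst[longest_list_index]) < len(lissst[i]):
--                     longest_list_index = i
--     return longest_list_index
-- ===== SOURCE B (Python) =====
-- def find_longest_list(lissst, free_seats):
--     candidates = [i for i in range(len(lissst)) if len(lissst[i]) <= free_seats]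
--     if not candidates:
--         return None
--     return max(candidates, key=lambda i: len(lissst[i]))
-- ===== Notes on version B (the rewrite author's own statement) =====
-- stated objective: idiomatic
-- what changed: Replaces A's guarded single-accumulator index scan with a filter-then-reduce decomposition: a comprehension collects the eligible indices and max(..., key=...) picks the first longest, dropping A's 'len(lissst) > 1' guard.
-- intended difference: On a one-element list whose single sublist fits in free_seats, A returns None because of its incidental 'len(lissst) > 1' guard, while B returns 0; returning the index of the fitting list is the intended behaviour of 'find the longest list that fits'. — e.g. on find_longest_list([[7]], 5): A returns none, B returns some 0
import Mathlib
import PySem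

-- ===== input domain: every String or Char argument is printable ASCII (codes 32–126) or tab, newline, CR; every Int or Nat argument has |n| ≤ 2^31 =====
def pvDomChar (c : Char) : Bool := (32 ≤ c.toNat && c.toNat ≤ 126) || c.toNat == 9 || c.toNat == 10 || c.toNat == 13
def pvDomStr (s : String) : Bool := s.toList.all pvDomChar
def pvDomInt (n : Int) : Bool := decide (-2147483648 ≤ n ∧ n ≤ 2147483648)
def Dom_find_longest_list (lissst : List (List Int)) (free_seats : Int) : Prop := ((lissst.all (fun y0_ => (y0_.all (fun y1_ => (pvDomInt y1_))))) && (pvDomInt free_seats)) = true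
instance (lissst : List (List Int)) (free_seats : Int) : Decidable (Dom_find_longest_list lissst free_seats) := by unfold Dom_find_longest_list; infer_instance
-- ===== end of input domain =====

-- ===== PORT A =====
-- B replaces A's guarded accumulator scan by a filter-then-max decomposition and drops the
-- incidental 'len(lissst) > 1' guard (intended difference stated in D_ below).
def find_longest_list (lissst : List (List Int)) (free_seats : Int) : Option Int :=
  let longest_list_index : Option Int := none
  if (lissst.length : Int) > 1 then
    (PySem.List.pyRange 0 lissst.length 1).foldl
      (fun acc i =>
        if ((PySem.List.pyGetD lissst i []).length : Int) ≤ free_seats then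
          match acc with
          | none => some i
          | some j =>
            if ((PySem.List.pyGetD lissst j []).length : Int)
                < ((PySem.List.pyGetD lissst i []).length : Int) then some i else acc
        else acc) longest_list_index
  else longest_list_index

-- ===== PORT B =====
def find_longest_list_alt (lissst : List (List Int)) (free_seats : Int) : Option Int :=
  let candidates := (PySem.List.pyRange 0 lissst.length 1).filter
      (fun i => decide (((PySem.List.pyGetD lissst i []).length : Int) ≤ free_seats))
  if candidates = [] then none
  else PySem.List.max? candidates (fun i => ((PySem.List.pyGetD lissst i []).length : Int))

-- ===== PRECONDITION & SPEC =====
-- On a one-element list whose single sublist fits in free_seats, A returns none (its 'len > 1'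
-- guard skips the scan) while B returns some 0, the intended index of the fitting longest list.
def D_find_longest_list (lissst : List (List Int)) (free_seats : Int) : Prop :=
  lissst.length = 1 ∧ ((lissst.getD 0 []).length : Int) ≤ free_seats
instance (lissst : List (List Int)) (free_seats : Int) : Decidable (D_find_longest_list lissst free_seats) := by unfold D_find_longest_list; infer_instance

def Spec_find_longest_list (lissst : List (List Int)) (free_seats : Int) (out : Option Int) : Prop := ¬ D_find_longest_list lissst free_seats → out = find_longest_list_alt lissst free_seats
instance (lissst : List (List Int)) (free_seats : Int) (out : Option Int) : Decidable (Spec_find_longest_list lissst free_seats out) := by unfold Spec_find_longest_list; infer_instance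

def pvDiffWitness_find_longest_list : List (List Int) × Int := ([[7]], 5)
def pvDiffWitnessOut_find_longest_list : (Option Int) × (Option Int) := (none, some 0)

-- ===== CLAIM (what is proved, stated in full; the proofs are below) =====
def Claim_unchanged_find_longest_list : Prop := ∀ (lissst : List (List Int)) (free_seats : Int), Dom_find_longest_list lissst free_seats → Spec_find_longest_list lissst free_seats (find_longest_list lissst free_seats)
def Claim_changed_find_longest_list : Prop := Dom_find_longest_list (pvDiffWitness_find_longest_list.1) (pvDiffWitness_find_longest_list.2) ∧ D_find_longest_list (pvDiffWitness_find_longest_list.1) (pvDiffWitness_find_longest_list.2) ∧ find_longest_list (pvDiffWitness_find_longest_list.1) (pvDiffWitness_find_longest_list.2) = pvDiffWitnessOut_find_longest_list.1 ∧ find_longest_list_alt (pvDiffWitness_find_longest_list.1) (pvDiffWitness_find_longest_list.2) = pvDiffWitnessOut_find_longest_list.2 ∧ pvDiffWitnessOut_find_longest_list.1 ≠ pvDiffWitnessOut_find_longest_list.2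
def Claim_exact_find_longest_list : Prop := ∀ (lissst : List (List Int)) (free_seats : Int), Dom_find_longest_list lissst free_seats → D_find_longest_list lissst free_seats → find_longest_list lissst free_seats ≠ find_longest_list_alt lissst free_seats

-- ===== LEMMAS AND PROOFS =====

-- A fold that skips elements failing p is the fold over the filtered list.
theorem foldl_filter_skip {A B : Type} (p : A → Prop) [DecidablePred p] (g : B → A → B) :
    ∀ (l : List A) (init : B),
      l.foldl (fun acc x => if p x then g acc x else acc) init
        = (l.filter (fun x => decide (p x))).foldl g init := by
  intro l
  induction l with
  | nil => intro init; rfl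
  | cons x t ih =>
    intro init
    by_cases hp : p x
    · simp [List.foldl, List.filter, hp, ih]
    · simp [List.foldl, List.filter, hp, ih]

-- A's running-maximum step (keeping the earlier index on ties) is exactly max?'s step.
theorem foldl_maxstep_eq_max? (k : Int → Int) (l : List Int) :
    l.foldl (fun acc i =>
        match acc with
        | none => some i
        | some j => if k j < k i then some i else acc) none = PySem.List.max? l k := by
  unfold PySem.List.max?
  congr 1
  funext acc i
  cases acc with
  | none => rfl
  | some j => rfl

-- B is the first-wins maximum of the filtered index list (the empty-list guard is redundant).
theorem find_longest_list_alt_eq_max? (lissst : List (List Int)) (free_seats : Int) :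
    find_longest_list_alt lissst free_seats =
      PySem.List.max?
        ((PySem.List.pyRange 0 lissst.length 1).filter
          (fun i => decide (((PySem.List.pyGetD lissst i []).length : Int) ≤ free_seats)))
        (fun i => ((PySem.List.pyGetD lissst i []).length : Int)) := by
  unfold find_longest_list_alt
  by_cases h : ((PySem.List.pyRange 0 lissst.length 1).filter
      (fun i => decide (((PySem.List.pyGetD lissst i []).length : Int) ≤ free_seats))) = []
  · simp [h, PySem.List.max?]
  · simp [h]

theorem pyRange_one : PySem.List.pyRange 0 1 1 = [0] := by decide

-- ===== VERDICT =====
theorem find_longest_list_spec : Claim_unchanged_find_longest_list := by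
  intro lissst free_seats _ hnd
  show find_longest_list lissst free_seats = find_longest_list_alt lissst free_seats
  rw [find_longest_list_alt_eq_max?]
  unfold find_longest_list
  dsimp only
  split_ifs with hlen
  · rw [foldl_filter_skip, foldl_maxstep_eq_max?]
  · cases lissst with
    | nil => rfl
    | cons x t =>
      cases t with
      | nil =>
        have hx : ¬ ((x.length : Int) ≤ free_seats) := fun hle => hnd ⟨rfl, by simpa using hle⟩
        simp [List.length_cons, pyRange_one, PySem.List.pyGetD_zero_cons, PySem.List.max?, hx]
      | cons y t2 =>
        exact absurd (by simp) hlen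

theorem find_longest_list_changed : Claim_changed_find_longest_list := by
  unfold Claim_changed_find_longest_list; decide

theorem find_longest_list_tight : Claim_exact_find_longest_list := by
  intro lissst free_seats _ hd
  obtain ⟨h1, h2⟩ := hd
  cases lissst with
  | nil => exact absurd h1 (by simp)
  | cons x t =>
    cases t with
    | nil =>
      have hx : ((x.length : Int) ≤ free_seats) := by simpa using h2
      rw [find_longest_list_alt_eq_max?]
      unfold find_longest_list
      simp [List.length_cons, pyRange_one, PySem.List.pyGetD_zero_cons, PySem.List.max?, hx]
    | cons y t2 => exact absurd h1 (by simp)
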